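-- pv_equiv track=rewrite | github.com/markvogel/100days | under100/day106.py | currently_winning
-- ===== SOURCE A (Python) =====
-- def currently_winning(scores):
--     y = [scores[i] for i in range(len(scores)) if not i % 2]
--     o = [scores[i] for i in range(len(scores)) if i % 2]
--     winning = []
--     for i in range(len(y)):
--         if y[i] == o[i]:
--             winning.append("T")
--         elif y[i] > o[i]:
--             winning.append("Y")
--         elif y[i] < o[i]:
--             winning.append("O")
--     return winning
-- ===== SOURCE B (Python) =====
-- def currently_winning(scores):
--     winning = []
--     pending = None
--     for s in scores:
--         if pending is None:
--             pending = s
--         else: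
--             winning.append("OTY"[(pending >= s) + (pending > s)])
--             pending = None
--     return winning
-- ===== Notes on version B (the rewrite author's own statement) =====
-- stated objective: simpler
-- what changed: B replaces A's three staged passes (build even-index list, build odd-index list, then an index loop with a three-branch if) by a single streaming pass holding one pending score, mapping each completed pair to its letter by indexing 'OTY' with the comparison sign; no index arithmetic or intermediate lists.
-- crash fix: On odd-length lists A raises IndexError (the last even-index score has no partner); B returns the letters for the complete pairs, ignoring the dangling score. — e.g. on currently_winning([7, 2, 3]): A raises IndexError, B returns ["Y"]
import Mathlib
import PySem

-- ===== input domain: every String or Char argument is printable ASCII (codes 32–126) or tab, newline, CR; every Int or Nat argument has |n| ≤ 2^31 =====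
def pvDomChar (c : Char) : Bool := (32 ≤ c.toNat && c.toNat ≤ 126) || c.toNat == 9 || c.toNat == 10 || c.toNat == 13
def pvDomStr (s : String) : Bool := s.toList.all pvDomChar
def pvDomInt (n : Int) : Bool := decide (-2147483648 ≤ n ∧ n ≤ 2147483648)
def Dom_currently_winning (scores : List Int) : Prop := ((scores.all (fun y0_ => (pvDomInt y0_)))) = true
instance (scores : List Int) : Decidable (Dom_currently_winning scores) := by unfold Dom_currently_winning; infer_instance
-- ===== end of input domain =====

-- B replaces A's three staged passes (even-index list, odd-index list, index-compare loop) by a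
-- single streaming pass with one pending score, indexing "OTY" by the comparison sign; same O(n)
-- cost, simpler. Pre_ excludes odd-length lists, on which A raises IndexError (B returns the
-- letters for the complete pairs there — see the Raises_ block).


-- ===== PORT A =====
-- indexing is via pyGetD with default 0: under Pre_ (even length) every access A makes is in
-- range, so the default is never returned and pyGetD is exact there.
def currently_winning (scores : List Int) : List String :=
  let y := ((PySem.List.pyRange 0 (scores.length : Int) 1).filter
              (fun i => PySem.Int.mod i 2 == 0)).map
           (fun i => PySem.List.pyGetD scores i 0)
  let o := ((PySem.List.pyRange 0 (scores.length : Int) 1).filter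
              (fun i => !(PySem.Int.mod i 2 == 0))).map
           (fun i => PySem.List.pyGetD scores i 0)
  (PySem.List.pyRange 0 (y.length : Int) 1).foldl
    (fun winning i =>
      if PySem.List.pyGetD y i 0 == PySem.List.pyGetD o i 0 then winning ++ ["T"]
      else if PySem.List.pyGetD y i 0 > PySem.List.pyGetD o i 0 then winning ++ ["Y"]
      else if PySem.List.pyGetD y i 0 < PySem.List.pyGetD o i 0 then winning ++ ["O"]
      else winning) []

-- ===== PORT B =====
-- "OTY"[(p >= s) + (p > s)] : the index is always 0, 1 or 2, so pyGet? is some and the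
-- 'X' default is unreachable (Python would raise IndexError only out of range).
def pvLetter (p s : Int) : String :=
  String.ofList [((PySem.Str.pyGet? "OTY"
      ((if p ≥ s then (1 : Int) else 0) + (if p > s then 1 else 0))).getD 'X')]

-- the streaming pass: state = (letters so far, pending unpaired score)
def currently_winning_alt (scores : List Int) : List String :=
  (scores.foldl
    (fun st s =>
      match st.2 with
      | none => (st.1, some s)
      | some p => (st.1 ++ [pvLetter p s], (none : Option Int)))
    ([], none)).1

-- ===== PRECONDITION & SPEC =====
-- Pre_ excludes exactly the odd-length lists: there A raises IndexError (the last even-index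
-- score has no odd-index partner).
def Pre_currently_winning (scores : List Int) : Prop := scores.length % 2 = 0
instance (scores : List Int) : Decidable (Pre_currently_winning scores) := by
  unfold Pre_currently_winning; infer_instance

def pvWitness_currently_winning : List Int := [5, 2, 3, 3]

-- On odd-length lists A raises IndexError; B returns the letters for the complete pairs.
def Raises_currently_winning (scores : List Int) : Prop := scores.length % 2 = 1
instance (scores : List Int) : Decidable (Raises_currently_winning scores) := by
  unfold Raises_currently_winning; infer_instance

def pvRaiseWitness_currently_winning : List Int := [7, 2, 3]
def pvRaiseWitnessOut_currently_winning : List String := ["Y"]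

def Spec_currently_winning (scores : List Int) (out : List String) : Prop :=
  out = currently_winning_alt scores
instance (scores : List Int) (out : List String) : Decidable (Spec_currently_winning scores out) := by
  unfold Spec_currently_winning; infer_instance

-- ===== CLAIM (what is proved, stated in full; the proofs are below) =====
def Claim_equal_currently_winning : Prop := ∀ (scores : List Int), Dom_currently_winning scores → Pre_currently_winning scores → Spec_currently_winning scores (currently_winning scores)
def Claim_raises_currently_winning : Prop := (∀ (scores : List Int), Dom_currently_winning scores → Raises_currently_winning scores → ¬ Pre_currently_winning scores) ∧ (Dom_currently_winning (pvRaiseWitness_currently_winning) ∧ Raises_currently_winning (pvRaiseWitness_currently_winning) ∧ currently_winning_alt (pvRaiseWitness_currently_winning) = pvRaiseWitnessOut_currently_winning)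

-- ===== LEMMAS AND PROOFS =====

-- reference form: the per-pair comparison, structural on the list
def pvPairs : List Int → List String
  | a :: b :: rest =>
      (if a == b then "T" else if a > b then "Y" else "O") :: pvPairs rest
  | _ => []

theorem pvLetter_eq (p s : Int) :
    pvLetter p s = (if p == s then "T" else if p > s then "Y" else "O") := by
  rcases lt_trichotomy p s with h | h | h
  · have h1 : ¬ p ≥ s := by omega
    have h2 : ¬ p > s := by omega
    have h3 : ¬ p = s := by omega
    simp only [pvLetter, if_neg h1, if_neg h2, beq_iff_eq, if_neg h3]
    decide
  · subst h
    simp only [pvLetter, ge_iff_le, le_refl, if_pos, gt_iff_lt, lt_irrefl, if_neg,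
      not_false_iff, beq_self_eq_true]
    decide
  · have h1 : p ≥ s := by omega
    have h3 : ¬ p = s := by omega
    simp only [pvLetter, if_pos h1, gt_iff_lt, if_pos h, beq_iff_eq, if_neg h3]
    decide

-- pending score left by the streaming pass
def pvPend : List Int → Option Int
  | [] => none
  | [a] => some a
  | _ :: _ :: rest => pvPend rest

theorem foldl_step (xs : List Int) : ∀ acc : List String,
    xs.foldl
      (fun st s =>
        match st.2 with
        | none => (st.1, some s)
        | some p => (st.1 ++ [pvLetter p s], (none : Option Int)))
      (acc, none) = (acc ++ pvPairs xs, pvPend xs) := by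
  induction xs using pvPairs.induct with
  | case1 a b rest ih =>
      intro acc
      simp only [List.foldl_cons, pvPairs, pvPend]
      rw [show (acc ++ [pvLetter a b]) =
            (acc ++ [if a == b then "T" else if a > b then "Y" else "O"]) by
          rw [pvLetter_eq]]
      rw [ih]
      simp
  | case2 xs h1 =>
      intro acc
      cases xs with
      | nil => simp [pvPairs, pvPend]
      | cons a t =>
        cases t with
        | nil => simp [pvPairs, pvPend]
        | cons b r => exact absurd rfl (h1 a b r)

theorem alt_eq_pvPairs (xs : List Int) : currently_winning_alt xs = pvPairs xs := by
  rw [currently_winning_alt, foldl_step]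
  simp

theorem filter_even_range (n : Nat) :
    (List.range n).filter (fun k => k % 2 == 0) =
      (List.range ((n + 1) / 2)).map (fun k => 2 * k) := by
  induction n with
  | zero => simp
  | succ n ih =>
      rw [List.range_succ, List.filter_append, ih]
      rcases Nat.even_or_odd n with ⟨m, hm⟩ | ⟨m, hm⟩
      · subst hm
        have h1 : (m + m + 1 + 1) / 2 = (m + m + 1) / 2 + 1 := by omega
        have h2 : (m + m) % 2 = 0 := by omega
        have h3 : (m + m + 1) / 2 = m := by omega
        rw [h1, List.range_succ, List.map_append]
        simp [h2, h3]
        omega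
      · subst hm
        have h1 : (2 * m + 1 + 1) / 2 = (2 * m + 1 + 1 + 1) / 2 := by omega
        rw [← h1]
        simp [Nat.add_mod]

theorem filter_odd_range (n : Nat) :
    (List.range n).filter (fun k => !(k % 2 == 0)) =
      (List.range (n / 2)).map (fun k => 2 * k + 1) := by
  induction n with
  | zero => simp
  | succ n ih =>
      rw [List.range_succ, List.filter_append, ih]
      rcases Nat.even_or_odd n with ⟨m, hm⟩ | ⟨m, hm⟩
      · subst hm
        have h1 : (m + m + 1) / 2 = (m + m) / 2 := by omega
        rw [h1]
        simp [Nat.add_mod]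
        omega
      · subst hm
        have h1 : (2 * m + 1 + 1) / 2 = (2 * m + 1) / 2 + 1 := by omega
        have h2 : (2 * m + 1) % 2 = 1 := by omega
        have h3 : (2 * m + 1) / 2 = m := by omega
        rw [h1, List.range_succ, List.map_append]
        simp [h2, h3]

theorem pvPairs_eq_map_range (xs : List Int) (he : xs.length % 2 = 0) :
    pvPairs xs = (List.range (xs.length / 2)).map
      (fun k => if xs.getD (2 * k) 0 == xs.getD (2 * k + 1) 0 then "T"
                else if xs.getD (2 * k) 0 > xs.getD (2 * k + 1) 0 then "Y" else "O") := by
  induction xs using pvPairs.induct with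
  | case1 a b rest ih =>
      have hr : rest.length % 2 = 0 := by simp at he; omega
      have hl : (a :: b :: rest).length / 2 = rest.length / 2 + 1 := by simp; omega
      rw [pvPairs, hl, List.range_succ_eq_map, List.map_cons, List.map_map, ih hr]
      refine congrArg₂ _ (by simp) ?_
      exact List.map_congr_left (fun k _ => by
        simp [Function.comp, Nat.succ_eq_add_one, Nat.mul_add])
  | case2 xs h1 =>
      cases xs with
      | nil => simp [pvPairs]
      | cons a t =>
        cases t with
        | nil => simp at he
        | cons b r => exact absurd rfl (h1 a b r)

theorem a_eq_pvPairs (xs : List Int) (he : xs.length % 2 = 0) :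
    currently_winning xs = pvPairs xs := by
  have hfun : ∀ (y o : List Int),
      (fun (winning : List String) (i : Int) =>
        if PySem.List.pyGetD y i 0 == PySem.List.pyGetD o i 0 then winning ++ ["T"]
        else if PySem.List.pyGetD y i 0 > PySem.List.pyGetD o i 0 then winning ++ ["Y"]
        else if PySem.List.pyGetD y i 0 < PySem.List.pyGetD o i 0 then winning ++ ["O"]
        else winning)
      = (fun winning i => winning ++
          [if PySem.List.pyGetD y i 0 == PySem.List.pyGetD o i 0 then "T"
           else if PySem.List.pyGetD y i 0 > PySem.List.pyGetD o i 0 then "Y" else "O"]) := by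
    intro y o; funext w i
    rcases lt_trichotomy (PySem.List.pyGetD y i 0) (PySem.List.pyGetD o i 0) with h | h | h
    · have h1 : ¬ (PySem.List.pyGetD y i 0 = PySem.List.pyGetD o i 0) := by omega
      have h2 : ¬ (PySem.List.pyGetD y i 0 > PySem.List.pyGetD o i 0) := by omega
      simp [h, h1, h2]
    · simp [h]
    · have h1 : ¬ (PySem.List.pyGetD y i 0 = PySem.List.pyGetD o i 0) := by omega
      simp [h, h1]
  rw [currently_winning]
  simp only [PySem.List.pyRange_zero_nat, List.filter_map]
  have hpe : ((fun i : Int => PySem.Int.mod i 2 == 0) ∘ (fun k : Nat => (k:Int))) = (fun k : Nat => k % 2 == 0) := by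
    funext k; simp [Function.comp]; omega
  have hpo : ((fun i : Int => !(PySem.Int.mod i 2 == 0)) ∘ (fun k : Nat => (k:Int))) = (fun k : Nat => !(k % 2 == 0)) := by
    funext k; simp [Function.comp]; omega
  rw [hpe, hpo, filter_even_range, filter_odd_range, List.map_map, List.map_map, hfun]
  rw [PySem.List.foldl_append_singleton_eq_map, List.nil_append]
  simp only [List.length_map, List.length_range, List.map_map]
  have hlen : (xs.length + 1) / 2 = xs.length / 2 := by omega
  rw [hlen]
  rw [pvPairs_eq_map_range xs he]
  refine (List.map_congr_left (fun k hk => ?_)).symm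
  simp only [List.mem_range] at hk
  simp only [Function.comp, PySem.List.pyGetD_natCast,
    PySem.List.getD_map_range _ _ _ _ (by omega : k < xs.length / 2)]

-- ===== VERDICT (by name: the statement is the Claim_ definition above) =====
theorem currently_winning_spec : Claim_equal_currently_winning := by
  intro scores _ hpre
  unfold Spec_currently_winning
  rw [a_eq_pvPairs scores hpre, alt_eq_pvPairs]

theorem currently_winning_raises : Claim_raises_currently_winning := by
  unfold Claim_raises_currently_winning
  exact ⟨fun scores _ hr hp => by
    unfold Raises_currently_winning at hr
    unfold Pre_currently_winning at hp
    omega, by decide⟩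

theorem pvRaiseWitness_ok :
    Raises_currently_winning pvRaiseWitness_currently_winning :=
  currently_winning_raises.2.2.1
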